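-- pv_equiv track=rewrite | github.com/MrHamdulay/csc3-capstone | examples/data/Assignment_8/fndnic001/question2.py | pairs
-- ===== SOURCE A (Python) =====
-- def pairs(words):
--     if len(words) == 0:
--         return 0
--     if len(words) == 1:
--         return 0
--     elif words[0] == words[1]:
--         return 1 + pairs(words[2:])
--     else:
--         return pairs(words[1:])
-- ===== SOURCE B (Python) =====
-- def pairs(words):
--     count = 0
--     skip = False
--     for prev, cur in zip(words, words[1:]):
--         if skip:
--             skip = False
--         elif prev == cur:
--             count += 1
--             skip = True
--     return count
-- ===== Notes on version B (the rewrite author's own statement) =====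
-- stated objective: faster
-- what changed: Replaced the recursion with list slicing at every step by a single iterative pass over zip(words, words[1:]) with a count and a skip flag.
import Mathlib
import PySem

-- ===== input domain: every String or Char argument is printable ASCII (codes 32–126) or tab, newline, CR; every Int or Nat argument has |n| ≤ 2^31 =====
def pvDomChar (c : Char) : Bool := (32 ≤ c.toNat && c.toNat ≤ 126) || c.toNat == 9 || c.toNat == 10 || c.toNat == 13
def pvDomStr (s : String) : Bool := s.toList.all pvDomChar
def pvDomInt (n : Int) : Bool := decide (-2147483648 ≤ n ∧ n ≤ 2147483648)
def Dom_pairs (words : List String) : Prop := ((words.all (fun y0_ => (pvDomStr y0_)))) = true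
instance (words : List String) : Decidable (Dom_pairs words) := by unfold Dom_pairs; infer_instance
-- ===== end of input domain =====

-- B replaces A's recursion-with-slicing (O(n^2)) by one linear pass with a skip flag.

-- ===== PORT A =====
-- A: recursion; words[2:] / words[1:] are the structural tails on a list.
def pairs : List String → Int
  | [] => 0
  | [_] => 0
  | a :: b :: rest => if a == b then 1 + pairs rest else pairs (b :: rest)

-- ===== PORT B =====
-- B's loop body: state (count, skip), one step per adjacent pair from zip(words, words[1:]).
def pvStep (st : Int × Bool) (p : String × String) : Int × Bool :=
  if st.2 then (st.1, false)
  else if p.1 == p.2 then (st.1 + 1, true)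
  else st

def pairs_alt (words : List String) : Int :=
  ((words.zip words.tail).foldl pvStep (0, false)).1

-- ===== PRECONDITION & SPEC =====
def Spec_pairs (words : List String) (out : Int) : Prop := out = pairs_alt words
instance (words : List String) (out : Int) : Decidable (Spec_pairs words out) := by unfold Spec_pairs; infer_instance

-- ===== CLAIM (what is proved, stated in full; the proofs are below) =====
def Claim_equal_pairs : Prop := ∀ (words : List String), Dom_pairs words → Spec_pairs words (pairs words)

-- ===== LEMMAS AND PROOFS =====

-- After a match the flag skips exactly the next pair, landing the fold on the tail-of-tail.
theorem pvFold_true (b : String) (r : List String) (c : Int) :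
    (((b :: r).zip r).foldl pvStep (c, true)).1
      = ((r.zip r.tail).foldl pvStep (c, false)).1 := by
  cases r with
  | nil => rfl
  | cons x xs => simp [List.zip, pvStep]

theorem pvFold_pairs (l : List String) (c : Int) :
    ((l.zip l.tail).foldl pvStep (c, false)).1 = pairs l + c := by
  induction l using pairs.induct generalizing c with
  | case1 => simp [pairs]
  | case2 _ => simp [pairs]
  | case3 a b rest h ih =>
    simp only [List.tail_cons, List.zip_cons_cons, List.foldl_cons, pvStep, h, if_true,
      Bool.false_eq_true, if_false]
    rw [pvFold_true, ih, pairs]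
    simp [h]
    ring
  | case4 a b rest h ih =>
    simp only [List.tail_cons, List.zip_cons_cons, List.foldl_cons, pvStep, h,
      Bool.false_eq_true, if_false, pairs]
    simpa using ih c

-- ===== VERDICT (by name: the statement is the Claim_ definition above) =====
theorem pairs_spec : Claim_equal_pairs := by
  intro words _
  unfold Spec_pairs pairs_alt
  rw [pvFold_pairs]
  ring
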